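-- pv_equiv track=rewrite | github.com/linnobck/pphw0 | stripes/stripes.py | make_stripes
-- ===== SOURCE A (Python) =====
-- def make_stripes(size: int, horizontal: bool) -> list[list[str]]:
--     """
--     Create a square list of lists with a striped pattern of '*' and 'o'.
--
--     The pattern should follow these rules:
--
--     If pattern is horizontal:
--         - then each even-numbered row (starting with 0) should be made of '*',
--         - odd-numbered rows should be made of 'o'.
--     If pattern is vertical (horizontal=False):
--         - then each even-numbered column (starting with 0) should be made of '*',
--         - odd-numbered columns should be made of 'o'.
--
--     Parameters:
--         size: int - Size of square's side.
--         horizontal: bool - True if horizontal, False if vertical.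
--     """
--
--     # create list of list with the right amount of rows and colums
--     sizing_list = []
--     for i in range(size):
--         sizing_list.append([""] * size)
--
--     if horizontal: # horizontal
--         for i in range(size):
--             # determine what symbols to put in row
--             if i%2 == 0 :
--                 sizing_list[i] = ["*"] * size
--             else:
--                 sizing_list[i] = ["o"] * size
--
--     else: #vertical
--         for i in range(size):
--             # determine what symbols to start rows with
--             # switch between * and o to create columns
--             for j in range(size):
--                 if j%2 == 0 :
--                     sizing_list[i][j] = "*"
--                 else:
--                     sizing_list[i][j] = "o"
--
--     # return fully created list to format in other function
--     return sizing_list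
-- ===== SOURCE B (Python) =====
-- def make_stripes(size: int, horizontal: bool) -> list[list[str]]:
--     # Build the grid once in horizontal orientation; transpose for vertical.
--     grid = [["*"] * size if i % 2 == 0 else ["o"] * size for i in range(size)]
--     if horizontal:
--         return grid
--     return [list(col) for col in zip(*grid)]
-- ===== Notes on version B (the rewrite author's own statement) =====
-- stated objective: simpler
-- what changed: B builds the grid once in horizontal orientation as a single comprehension and obtains the vertical case by transposing (zip(*grid)), replacing A's two separate fill loops (row replacement vs nested per-cell assignment) and its throwaway pre-allocation pass.
import Mathlib
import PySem

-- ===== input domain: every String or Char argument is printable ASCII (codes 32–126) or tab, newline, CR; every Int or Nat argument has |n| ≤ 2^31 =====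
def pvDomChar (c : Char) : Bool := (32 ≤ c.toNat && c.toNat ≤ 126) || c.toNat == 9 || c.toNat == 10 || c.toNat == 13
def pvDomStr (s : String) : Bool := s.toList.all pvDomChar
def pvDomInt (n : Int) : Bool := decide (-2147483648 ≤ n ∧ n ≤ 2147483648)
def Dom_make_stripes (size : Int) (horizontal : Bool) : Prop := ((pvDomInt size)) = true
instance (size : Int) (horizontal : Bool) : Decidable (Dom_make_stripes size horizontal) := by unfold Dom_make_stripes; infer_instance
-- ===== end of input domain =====

-- B builds the grid once in horizontal orientation and transposes for the vertical case,
-- replacing A's pre-allocation pass and its two separate fill loops (objective: simpler).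

-- ===== PORT A =====
def make_stripes (size : Int) (horizontal : Bool) : List (List String) :=
  -- sizing_list = []; for i in range(size): sizing_list.append([""] * size)
  let sizing := (PySem.List.pyRange 0 size 1).foldl
    (fun acc _ => acc ++ [List.replicate size.toNat ""]) []
  if horizontal then
    -- for i in range(size): sizing_list[i] = ["*"]*size  or  ["o"]*size
    (PySem.List.pyRange 0 size 1).foldl
      (fun acc i =>
        if i % 2 == 0 then acc.set i.toNat (List.replicate size.toNat "*")
        else acc.set i.toNat (List.replicate size.toNat "o")) sizing
  else
    -- for i in range(size): for j in range(size): sizing_list[i][j] = "*" / "o"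
    (PySem.List.pyRange 0 size 1).foldl
      (fun acc i =>
        (PySem.List.pyRange 0 size 1).foldl
          (fun acc2 j =>
            if j % 2 == 0 then acc2.modify i.toNat (fun row => row.set j.toNat "*")
            else acc2.modify i.toNat (fun row => row.set j.toNat "o")) acc) sizing

-- ===== PORT B =====
-- zip(*m): take heads of all rows while every row is nonempty (and m itself nonempty)
def pvZipStar (m : List (List String)) : List (List String) :=
  if m.isEmpty || m.any (fun r => r.isEmpty) then []
  else m.map (fun r => r.headD "") :: pvZipStar (m.map (fun r => r.tail))
termination_by (m.headD []).length
decreasing_by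
  cases m with
  | nil => simp at *
  | cons r rs =>
    simp only [List.isEmpty_cons, List.any_cons, Bool.or_eq_true] at *
    cases r with
    | nil => simp_all
    | cons a as => simp

def make_stripes_alt (size : Int) (horizontal : Bool) : List (List String) :=
  -- grid = [["*"]*size if i%2==0 else ["o"]*size for i in range(size)]
  let grid := (PySem.List.pyRange 0 size 1).map
    (fun i => if i % 2 == 0 then List.replicate size.toNat "*" else List.replicate size.toNat "o")
  if horizontal then grid else pvZipStar grid

-- ===== PRECONDITION & SPEC =====
def Spec_make_stripes (size : Int) (horizontal : Bool) (out : List (List String)) : Prop := out = make_stripes_alt size horizontal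
instance (size : Int) (horizontal : Bool) (out : List (List String)) : Decidable (Spec_make_stripes size horizontal out) := by unfold Spec_make_stripes; infer_instance

-- ===== CLAIM (what is proved, stated in full; the proofs are below) =====
def Claim_equal_make_stripes : Prop := ∀ (size : Int) (horizontal : Bool), Dom_make_stripes size horizontal → Spec_make_stripes size horizontal (make_stripes size horizontal)

-- ===== LEMMAS AND PROOFS =====

-- the stripe symbol of line k
def pvC (k : Nat) : String := if k % 2 = 0 then "*" else "o"

-- appending one copy per element builds a replicate
theorem pv_foldl_append_rep {α β : Type} (l : List α) (x : β) (acc : List β) :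
    l.foldl (fun a _ => a ++ [x]) acc = acc ++ List.replicate l.length x := by
  induction l generalizing acc with
  | nil => simp
  | cons h t ih => simp [List.foldl_cons, ih, List.replicate_succ]

-- setting every index of a prefix replaces that prefix by a map
theorem pv_foldl_set_range {β : Type} (g : Nat → β) :
    ∀ (k : Nat) (l : List β), k ≤ l.length →
      (List.range k).foldl (fun acc i => acc.set i (g i)) l
        = (List.range k).map g ++ l.drop k := by
  intro k
  induction k with
  | zero => simp
  | succ k ih =>
    intro l hk
    rw [List.range_succ, List.foldl_append, List.foldl_cons, List.foldl_nil,
        ih l (by omega), List.set_append, List.map_append]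
    have hkl : k < l.length := by omega
    rw [List.drop_eq_getElem_cons hkl]
    simp only [List.length_map, List.length_range, lt_irrefl, if_false, Nat.sub_self,
      List.set_cons_zero]
    simp [List.append_assoc]

-- modifying the same index repeatedly composes
theorem pv_modify_modify {β : Type} (l : List β) (k : Nat) (f g : β → β) :
    (l.modify k g).modify k f = l.modify k (fun x => f (g x)) := by
  apply List.ext_getElem?
  intro j
  simp only [List.getElem?_modify]
  cases l[j]? <;> simp <;> split <;> simp

-- a fold of modifies at one fixed index is one modify by the folded function
theorem pv_foldl_modify_fixed {α β : Type} (k : Nat) (h : α → β → β) :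
    ∀ (l : List α) (acc : List β),
      l.foldl (fun acc2 j => acc2.modify k (h j)) acc
        = acc.modify k (fun row => l.foldl (fun row j => h j row) row) := by
  intro l
  induction l with
  | nil =>
    intro acc
    apply List.ext_getElem?
    intro j
    simp only [List.foldl_nil, List.getElem?_modify]
    cases acc[j]? <;> simp
  | cons a t ih =>
    intro acc
    simp only [List.foldl_cons, ih, pv_modify_modify]

-- modifying every index of a prefix rewrites it elementwise from the original list
theorem pv_foldl_modify_range {β : Type} [Inhabited β] (f : Nat → β → β) :
    ∀ (k : Nat) (l : List β), k ≤ l.length →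
      (List.range k).foldl (fun acc i => acc.modify i (f i)) l
        = (List.range k).map (fun i => f i (l.getD i default)) ++ l.drop k := by
  intro k
  induction k with
  | zero => simp
  | succ k ih =>
    intro l hk
    have hkl : k < l.length := by omega
    rw [List.range_succ, List.foldl_append, List.foldl_cons, List.foldl_nil,
        ih l (by omega), List.drop_eq_getElem_cons hkl]
    have hA : (List.map (fun i => f i (l.getD i default)) (List.range k)).length = k := by simp
    rw [List.modify_eq_take_cons_drop (by simp; omega)]
    rw [List.take_append_of_le_length (by omega), List.take_of_length_le (by omega)]
    rw [List.getElem_append_right (by omega), List.drop_append]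
    simp [hA, List.map_append, List.range_succ,
      List.getD_eq_getElem?_getD, List.getElem?_eq_getElem hkl]

-- pvZipStar transposes a list of constant rows
theorem pv_zipStar_rep {α : Type} :
    ∀ (n : Nat) (l : List α) (f : α → String), l ≠ [] →
      pvZipStar (l.map fun x => List.replicate n (f x))
        = List.replicate n (l.map f) := by
  intro n
  induction n with
  | zero =>
    intro l f hl
    rw [pvZipStar]
    cases l with
    | nil => simp at hl
    | cons a t => simp
  | succ n ih =>
    intro l f hl
    rw [pvZipStar]
    have h1 : (l.map fun x => List.replicate (n+1) (f x)).isEmpty = false := by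
      cases l with | nil => simp at hl | cons a t => simp
    have h2 : (l.map fun x => List.replicate (n+1) (f x)).any (fun r => r.isEmpty) = false := by
      simp [List.replicate_succ]
    rw [h1, h2]
    simp only [Bool.or_self, Bool.false_or, if_neg Bool.false_ne_true,
      List.map_map, Function.comp_def, List.replicate_succ, List.headD_cons,
      List.tail_cons]
    rw [ih l f hl]

-- integer parity test on a cast natural agrees with the natural one
theorem pv_cast_parity (k : Nat) : (((0:Int) + (k:Int)) % 2 == 0) = ((k % 2 : Nat) == 0) := by
  simp only [zero_add]
  by_cases h : k % 2 = 0
  · have h2 : (k : Int) % 2 = 0 := by omega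
    simp [h, h2]
  · have h2 : ¬ ((k : Int) % 2 = 0) := by omega
    simp [h, h2]

theorem pv_cast_toNat (k : Nat) : ((0:Int) + (k:Int)).toNat = k := by simp

-- the canonical horizontal grid
def pvGrid (n : Nat) : List (List String) :=
  (List.range n).map (fun k => List.replicate n (pvC k))

theorem pv_alt_horizontal (size : Int) :
    make_stripes_alt size true = pvGrid size.toNat := by
  unfold make_stripes_alt pvGrid pvC
  simp only [if_pos rfl, PySem.List.pyRange_one, Int.sub_zero, List.map_map]
  apply List.map_congr_left
  intro k _
  simp only [Function.comp_def, pv_cast_parity, pv_cast_toNat]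
  split <;> simp_all

theorem pv_alt_vertical (size : Int) :
    make_stripes_alt size false
      = List.replicate size.toNat ((List.range size.toNat).map pvC) := by
  unfold make_stripes_alt
  simp only [Bool.false_eq_true, if_neg, if_false]
  have hgrid : ((PySem.List.pyRange 0 size 1).map
      (fun i => if i % 2 == 0 then List.replicate size.toNat "*" else List.replicate size.toNat "o"))
      = (List.range size.toNat).map (fun k => List.replicate size.toNat (pvC k)) := by
    simp only [PySem.List.pyRange_one, Int.sub_zero, List.map_map]
    apply List.map_congr_left
    intro k _
    simp only [Function.comp_def, pv_cast_parity]
    unfold pvC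
    split <;> simp_all
  rw [hgrid]
  rcases Nat.eq_zero_or_pos size.toNat with h0 | hpos
  · simp [h0, pvZipStar]
  · have hne : List.range size.toNat ≠ [] := by
      simp [List.range_eq_nil]; omega
    rw [pv_zipStar_rep size.toNat (List.range size.toNat) pvC hne]

-- the pre-allocation pass of A builds a square of empty strings
theorem pv_sizing (size : Int) :
    (PySem.List.pyRange 0 size 1).foldl
      (fun acc _ => acc ++ [List.replicate size.toNat ""]) []
      = List.replicate size.toNat (List.replicate size.toNat "") := by
  rw [pv_foldl_append_rep]
  simp [PySem.List.pyRange_one]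

theorem pv_A_horizontal (size : Int) :
    make_stripes size true = pvGrid size.toNat := by
  unfold make_stripes
  rw [if_pos rfl, pv_sizing]
  simp only [PySem.List.pyRange_one, Int.sub_zero, List.foldl_map]
  have hfun : (fun (acc : List (List String)) (k : Nat) =>
      if ((0:Int) + (k:Int)) % 2 == 0 then acc.set ((0:Int) + (k:Int)).toNat (List.replicate size.toNat "*")
      else acc.set ((0:Int) + (k:Int)).toNat (List.replicate size.toNat "o"))
      = fun acc k => acc.set k (List.replicate size.toNat (pvC k)) := by
    funext acc k
    simp only [pv_cast_parity, pv_cast_toNat]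
    unfold pvC
    split <;> simp_all
  rw [hfun]
  rw [pv_foldl_set_range (fun k => List.replicate size.toNat (pvC k)) size.toNat
    (List.replicate size.toNat (List.replicate size.toNat "")) (by simp)]
  simp [pvGrid]

theorem pv_A_vertical (size : Int) :
    make_stripes size false
      = List.replicate size.toNat ((List.range size.toNat).map pvC) := by
  unfold make_stripes
  rw [if_neg (by simp), pv_sizing]
  simp only [PySem.List.pyRange_one, Int.sub_zero, List.foldl_map]
  have houter : (fun (acc : List (List String)) (i : Nat) =>
      (List.range size.toNat).foldl
        (fun acc2 (m : Nat) =>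
          if ((0:Int) + (m:Int)) % 2 == 0 then
            acc2.modify ((0:Int) + (i:Int)).toNat (fun row => row.set ((0:Int) + (m:Int)).toNat "*")
          else
            acc2.modify ((0:Int) + (i:Int)).toNat (fun row => row.set ((0:Int) + (m:Int)).toNat "o")) acc)
      = fun acc i => acc.modify i
          (fun row => (List.range size.toNat).foldl (fun row m => row.set m (pvC m)) row) := by
    funext acc i
    have hstep : (fun (acc2 : List (List String)) (m : Nat) =>
        if ((0:Int) + (m:Int)) % 2 == 0 then
          acc2.modify ((0:Int) + (i:Int)).toNat (fun row => row.set ((0:Int) + (m:Int)).toNat "*")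
        else
          acc2.modify ((0:Int) + (i:Int)).toNat (fun row => row.set ((0:Int) + (m:Int)).toNat "o"))
        = fun acc2 m => acc2.modify i (fun row => row.set m (pvC m)) := by
      funext acc2 m
      simp only [pv_cast_parity, pv_cast_toNat]
      unfold pvC
      split <;> simp_all
    rw [hstep, pv_foldl_modify_fixed]
  rw [houter]
  rw [pv_foldl_modify_range _ size.toNat
    (List.replicate size.toNat (List.replicate size.toNat "")) (by simp)]
  simp only [List.drop_replicate, Nat.sub_self, List.replicate_zero, List.append_nil]
  apply List.ext_getElem
  · simp
  · intro j hj hj'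
    simp only [List.getElem_map, List.getElem_range, List.getElem_replicate]
    have hjlt : j < size.toNat := by simpa using hj
    rw [List.getD_eq_getElem?_getD, List.getElem?_replicate_of_lt hjlt]
    simp only [Option.getD_some]
    rw [pv_foldl_set_range pvC size.toNat (List.replicate size.toNat "") (by simp)]
    simp

-- ===== VERDICT (by name: the statement is the Claim_ definition above) =====
theorem make_stripes_spec : Claim_equal_make_stripes := by
  intro size horizontal _
  unfold Spec_make_stripes
  cases horizontal
  · rw [pv_A_vertical, pv_alt_vertical]
  · rw [pv_A_horizontal, pv_alt_horizontal]
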